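-- pv_equiv track=rewrite | github.com/rwalker123/ootp-db | src/lineup_optimizer/engine.py | score_alternation
-- ===== SOURCE A (Python) =====
-- def score_alternation(lineup):
--     """Score L/R/S alternation 0–10 (10 = perfect alternation)."""
--     bats_seq = [lineup[s].get("bats") or 1 for s in range(1, 10) if s in lineup]
--     score = 10
--     run = 1
--     for i in range(1, len(bats_seq)):
--         curr, prev = bats_seq[i], bats_seq[i - 1]
--         if curr == 3 or prev == 3:  # switch hitter: reset run, no penalty
--             run = 1
--             continue
--         if curr == prev:
--             run += 1
--             if run == 3: score -= 1
--             if run == 4: score -= 1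
--             if run >= 5: score -= 1
--         else:
--             run = 1
--     return max(0, score)
-- ===== SOURCE B (Python) =====
-- def _penalty(seq):
--     """Total alternation penalty: each maximal run of k equal non-switch
--     batters costs max(0, k - 2); switch-hitter (3) runs cost nothing."""
--     if not seq:
--         return 0
--     v = seq[0]
--     run = 1
--     rest = seq[1:]
--     while rest and rest[0] == v:
--         run += 1
--         rest = rest[1:]
--     return (0 if v == 3 else max(0, run - 2)) + _penalty(rest)
--
--
-- def score_alternation(lineup):
--     """Score L/R/S alternation 0-10 (10 = perfect alternation)."""
--     bats_seq = [lineup[s].get("bats") or 1 for s in range(1, 10) if s in lineup]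
--     return max(0, 10 - _penalty(bats_seq))
-- ===== Notes on version B (the rewrite author's own statement) =====
-- stated objective: simpler
-- what changed: Replaces A's index loop with its incremental score/run counter and threshold tests by a run-length decomposition: split bats_seq into maximal runs of equal values and subtract the closed-form cost max(0, len-2) for each non-switch run.
import Mathlib
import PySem

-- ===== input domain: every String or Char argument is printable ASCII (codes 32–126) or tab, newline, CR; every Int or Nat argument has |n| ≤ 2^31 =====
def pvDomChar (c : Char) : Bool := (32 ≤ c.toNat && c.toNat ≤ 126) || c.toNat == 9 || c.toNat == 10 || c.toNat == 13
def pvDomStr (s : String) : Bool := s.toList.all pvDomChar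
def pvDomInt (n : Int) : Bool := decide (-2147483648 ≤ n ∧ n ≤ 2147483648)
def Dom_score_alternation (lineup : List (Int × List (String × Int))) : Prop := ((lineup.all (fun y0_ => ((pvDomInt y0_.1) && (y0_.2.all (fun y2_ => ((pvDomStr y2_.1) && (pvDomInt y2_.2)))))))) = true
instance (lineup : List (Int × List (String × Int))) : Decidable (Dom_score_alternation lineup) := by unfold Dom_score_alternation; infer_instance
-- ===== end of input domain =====

-- B replaces A's incremental run/score counter by a run-length decomposition
-- (each maximal non-switch run of length k costs max(0, k-2)); simpler, same cost.


-- ===== PORT A =====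
-- shared comprehension: [lineup[s].get("bats") or 1 for s in range(1, 10) if s in lineup]
def pvBatsSeq (lineup : List (Int × List (String × Int))) : List Int :=
  ((PySem.List.pyRange 1 10 1).filter
      (fun s => (PySem.Dict.mk lineup).contains s)).map
    (fun s =>
      match (PySem.Dict.mk lineup).get? s with
      | some d =>
        match (PySem.Dict.mk d).get? "bats" with
        | some b => if b = 0 then 1 else b   -- `x or 1` : falsy int (0) becomes 1
        | none => 1                          -- .get missing key -> None -> `or 1`
      | none => 1)                           -- unreachable: s passed the filter

def score_alternation (lineup : List (Int × List (String × Int))) : Int :=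
  let bats_seq := pvBatsSeq lineup
  let st :=
    (PySem.List.pyRange 1 (bats_seq.length : Int) 1).foldl
      (fun (st : Int × Int) i =>                 -- st = (score, run)
        let curr := PySem.List.pyGetD bats_seq i 0
        let prev := PySem.List.pyGetD bats_seq (i - 1) 0
        if curr = 3 ∨ prev = 3 then (st.1, 1)
        else if curr = prev then
          let run := st.2 + 1
          let score := if run = 3 then st.1 - 1 else st.1
          let score := if run = 4 then score - 1 else score
          let score := if 5 ≤ run then score - 1 else score
          (score, run)
        else (st.1, 1))
      (10, 1)
  max 0 st.1

-- ===== PORT B =====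
-- the `while rest and rest[0] == v: run += 1; rest = rest[1:]` loop of _penalty
def pvRunSplit (v : Int) (run : Int) : List Int → Int × List Int
  | [] => (run, [])
  | b :: rest' => if b == v then pvRunSplit v (run + 1) rest' else (run, b :: rest')

-- needed by pvPenalty's termination proof
theorem pvRunSplit_len_le (v run : Int) (l : List Int) :
    (pvRunSplit v run l).2.length ≤ l.length := by
  induction l generalizing run with
  | nil => simp [pvRunSplit]
  | cons b rest ih =>
    simp only [pvRunSplit]
    split
    · exact (ih (run + 1)).trans (by simp)
    · simp

def pvPenalty : List Int → Int
  | [] => 0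
  | v :: rest0 =>
    let p := pvRunSplit v 1 rest0
    (if v = 3 then 0 else max 0 (p.1 - 2)) + pvPenalty p.2
termination_by seq => seq.length
decreasing_by
  have := pvRunSplit_len_le v 1 rest0
  simp at *; omega

def score_alternation_alt (lineup : List (Int × List (String × Int))) : Int :=
  max 0 (10 - pvPenalty (pvBatsSeq lineup))

-- ===== PRECONDITION & SPEC =====
def Spec_score_alternation (lineup : List (Int × List (String × Int))) (out : Int) : Prop := out = score_alternation_alt lineup
instance (lineup : List (Int × List (String × Int))) (out : Int) : Decidable (Spec_score_alternation lineup out) := by unfold Spec_score_alternation; infer_instance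

-- ===== CLAIM (what is proved, stated in full; the proofs are below) =====
def Claim_equal_score_alternation : Prop := ∀ (lineup : List (Int × List (String × Int))), Dom_score_alternation lineup → Spec_score_alternation lineup (score_alternation lineup)

-- ===== LEMMAS AND PROOFS =====

theorem pvRunSplit_eq (v : Int) (run : Int) (l : List Int) :
    pvRunSplit v run l =
      (run + (l.takeWhile (· == v)).length, l.dropWhile (· == v)) := by
  induction l generalizing run with
  | nil => simp [pvRunSplit]
  | cons b rest ih =>
    simp only [pvRunSplit, List.takeWhile, List.dropWhile]
    by_cases h : b == v
    · simp [h, ih]; omega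
    · simp [h]

-- A's loop body, on the (curr, prev) pair it reads
def pvStep (st : Int × Int) (cp : Int × Int) : Int × Int :=
  if cp.1 = 3 ∨ cp.2 = 3 then (st.1, 1)
  else if cp.1 = cp.2 then
    let run := st.2 + 1
    let score := if run = 3 then st.1 - 1 else st.1
    let score := if run = 4 then score - 1 else score
    let score := if 5 ≤ run then score - 1 else score
    (score, run)
  else (st.1, 1)

theorem pvStep_reset (st : Int × Int) (cp : Int × Int) (h : cp.1 ≠ cp.2) :
    pvStep st cp = (st.1, 1) := by
  unfold pvStep
  by_cases h1 : cp.1 = 3 ∨ cp.2 = 3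
  · rw [if_pos h1]
  · rw [if_neg h1, if_neg h]

theorem pv_fold_run3 (n : Nat) (score : Int) :
    (List.replicate n ((3 : Int), (3 : Int))).foldl pvStep (score, 1) = (score, 1) := by
  induction n with
  | zero => simp
  | succ m ih => simpa [List.replicate_succ, pvStep] using ih

-- fold over a run of (v,v) pairs, v ≠ 3
theorem pv_fold_run (v : Int) (hv : v ≠ 3) (n : Nat) :
    ∀ (score run : Int), 1 ≤ run →
      (List.replicate n (v, v)).foldl pvStep (score, run)
        = (score - (max 0 (run + n - 2) - max 0 (run - 2)), run + n) := by
  induction n with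
  | zero => intro score run h; simp
  | succ m ih =>
    intro score run h
    rw [List.replicate_succ, List.foldl_cons]
    have hst : pvStep (score, run) (v, v)
        = ((if 5 ≤ run + 1 then (if run + 1 = 4 then (if run + 1 = 3 then score - 1 else score) - 1 else (if run + 1 = 3 then score - 1 else score)) - 1 else (if run + 1 = 4 then (if run + 1 = 3 then score - 1 else score) - 1 else (if run + 1 = 3 then score - 1 else score))), run + 1) := by
      simp [pvStep, hv]
    rw [hst, ih _ (run + 1) (by omega), Prod.mk.injEq]
    exact ⟨by split_ifs <;> omega, by omega⟩

-- the index loop reads exactly the adjacent pairs (xs[i], xs[i-1])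
theorem pv_pairs_eq (xs : List Int) :
    (PySem.List.pyRange 1 (xs.length : Int) 1).map
        (fun i => (PySem.List.pyGetD xs i 0, PySem.List.pyGetD xs (i - 1) 0))
      = (xs.drop 1).zip xs := by
  apply List.ext_getElem
  · simp [PySem.List.length_pyRange_one, List.length_zip]
  · intro k h1 h2
    have hk : k < xs.length - 1 := by
      simp [PySem.List.length_pyRange_one] at h1; omega
    simp only [List.getElem_map, PySem.List.getElem_pyRange_one, List.getElem_zip,
      List.getElem_drop]
    have e1 : (1 : Int) + k = ((1 + k : Nat) : Int) := by push_cast; ring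
    have e2 : ((1 + k : Nat) : Int) - 1 = ((k : Nat) : Int) := by push_cast; ring
    rw [e1, e2, PySem.List.pyGetD_natCast, PySem.List.pyGetD_natCast,
      List.getD_eq_getElem xs 0 (by omega), List.getD_eq_getElem xs 0 (by omega)]

-- adjacent pairs of (v :: run-of-v ++ r): the run's (v,v) pairs, the boundary pair, r's pairs
theorem pv_zip_decomp (v : Int) (r : List Int) :
    ∀ t : List Int, (∀ x ∈ t, x = v) →
      ((v :: (t ++ r)).drop 1).zip (v :: (t ++ r))
        = List.replicate t.length (v, v) ++
          (match r with
           | [] => []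
           | w :: _ => (w, v) :: ((r.drop 1).zip r))
  | [], _ => by
    cases r with
    | nil => rfl
    | cons w r' => rfl
  | a :: t', h => by
    have ha : a = v := h a (by simp)
    subst ha
    have ih := pv_zip_decomp a r t' (fun x hx => h x (by simp [hx]))
    simpa [List.replicate_succ] using ih

theorem pv_dropWhile_head (p : Int → Bool) (l : List Int) (w : Int) (r' : List Int)
    (h : l.dropWhile p = w :: r') : p w = false := by
  induction l with
  | nil => simp at h
  | cons a t ih =>
    rw [List.dropWhile_cons] at h
    by_cases hp : p a
    · exact ih (by simpa [hp] using h)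
    · simp [hp] at h
      rw [← h.1]
      simpa using hp

theorem pv_main (xs : List Int) (score : Int) :
    (((xs.drop 1).zip xs).foldl pvStep (score, 1)).1 = score - pvPenalty xs := by
  match xs with
  | [] => simp [pvPenalty]
  | v :: rest =>
    have htr : rest = rest.takeWhile (· == v) ++ rest.dropWhile (· == v) :=
      (List.takeWhile_append_dropWhile).symm
    have htv : ∀ x ∈ rest.takeWhile (· == v), x = v := fun x hx => by
      have := List.mem_takeWhile_imp hx
      simpa using this
    have hlen : (rest.dropWhile (· == v)).length ≤ rest.length :=
      (List.dropWhile_suffix _).length_le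
    have hpen : pvPenalty (v :: rest)
        = (if v = 3 then 0 else
            max 0 ((1 : Int) + (rest.takeWhile (· == v)).length - 2))
          + pvPenalty (rest.dropWhile (· == v)) := by
      rw [pvPenalty, pvRunSplit_eq]
    rw [hpen]
    conv_lhs => rw [htr]
    rw [pv_zip_decomp v (rest.dropWhile (· == v)) (rest.takeWhile (· == v)) htv,
      List.foldl_append]
    by_cases hv : v = 3
    · subst hv
      rw [pv_fold_run3]
      cases hr : rest.dropWhile (· == (3 : Int)) with
      | nil => simp [pvPenalty]
      | cons w r' =>
        have hrec := pv_main (w :: r') score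
        have hb : pvStep (score, 1) (w, 3) = (score, 1) := by simp [pvStep]
        simp only [List.drop_succ_cons, List.drop_zero] at hrec
        rw [List.foldl_cons, hb]
        simp only [List.drop_succ_cons, List.drop_zero]
        rw [hrec]
        simp
    · rw [pv_fold_run v hv _ score 1 (by omega)]
      cases hr : rest.dropWhile (· == v) with
      | nil =>
        simp only [List.foldl_nil, pvPenalty, hv, if_false]
        push_cast
        omega
      | cons w r' =>
        have hw : (w == v) = false := pv_dropWhile_head _ rest w r' hr
        have hwv : w ≠ v := by simpa using hw
        have hb := pvStep_reset
          (score - (max 0 (1 + ((rest.takeWhile (· == v)).length : Int) - 2) - max 0 (1 - 2)),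
            1 + ((rest.takeWhile (· == v)).length : Int)) (w, v) hwv
        have hrec := pv_main (w :: r') (score - (max 0 (1 + ((rest.takeWhile (· == v)).length : Int) - 2) - max 0 (1 - 2)))
        simp only [List.foldl_cons, hb, List.drop_succ_cons, List.drop_zero] at hrec ⊢
        rw [hrec]
        simp only [hv, if_false]
        push_cast
        omega
termination_by xs.length
decreasing_by
  all_goals
    simp only [hr, List.length_cons] at hlen
    simp only [List.length_cons]
    omega

theorem pv_eq (xs : List Int) :
    max 0 ((PySem.List.pyRange 1 (xs.length : Int) 1).foldl
        (fun (st : Int × Int) i =>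
          let curr := PySem.List.pyGetD xs i 0
          let prev := PySem.List.pyGetD xs (i - 1) 0
          if curr = 3 ∨ prev = 3 then (st.1, 1)
          else if curr = prev then
            let run := st.2 + 1
            let score := if run = 3 then st.1 - 1 else st.1
            let score := if run = 4 then score - 1 else score
            let score := if 5 ≤ run then score - 1 else score
            (score, run)
          else (st.1, 1)) (10, 1)).1 = max 0 (10 - pvPenalty xs) := by
  have hfold : (PySem.List.pyRange 1 (xs.length : Int) 1).foldl
      (fun (st : Int × Int) i =>
        pvStep st (PySem.List.pyGetD xs i 0, PySem.List.pyGetD xs (i - 1) 0)) (10, 1)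
      = ((PySem.List.pyRange 1 (xs.length : Int) 1).map
          (fun i => (PySem.List.pyGetD xs i 0, PySem.List.pyGetD xs (i - 1) 0))).foldl
          pvStep (10, 1) := by
    rw [List.foldl_map]
  have h2 := pv_main xs 10
  rw [pv_pairs_eq] at hfold
  calc max 0 ((PySem.List.pyRange 1 (xs.length : Int) 1).foldl
        (fun (st : Int × Int) i =>
          let curr := PySem.List.pyGetD xs i 0
          let prev := PySem.List.pyGetD xs (i - 1) 0
          if curr = 3 ∨ prev = 3 then (st.1, 1)
          else if curr = prev then
            let run := st.2 + 1
            let score := if run = 3 then st.1 - 1 else st.1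
            let score := if run = 4 then score - 1 else score
            let score := if 5 ≤ run then score - 1 else score
            (score, run)
          else (st.1, 1)) (10, 1)).1
      = max 0 ((((xs.drop 1).zip xs).foldl pvStep (10, 1)).1) := by rw [← hfold]; rfl
    _ = max 0 (10 - pvPenalty xs) := by rw [h2]

-- ===== VERDICT (by name: the statement is the Claim_ definition above) =====
theorem score_alternation_spec : Claim_equal_score_alternation := by
  intro lineup _
  show score_alternation lineup = score_alternation_alt lineup
  unfold score_alternation score_alternation_alt
  exact pv_eq (pvBatsSeq lineup)
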